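-- pv_equiv track=rewrite | github.com/nickirk/pymes | pymes/hamil/hamil.py | determinant_excitation
-- ===== SOURCE A (Python) =====
-- def determinant_excitation(d1, d2):
--     '''Find the excitation connecting two Slater determinants.
--
-- :type p1: iterable of single-particle basis functions
-- :param p1: a Slater determinant basis function
-- :type p2: iterable of single-particle basis functions
-- :param p2: a Slater determinant basis function
--
-- :returns: (from_1, to_1, nperm) where:
--
--     from_1
--         list of single-particle basis functions excited from d1
--     to_2
--         list of single-particle basis functions excited into d2
--     nperm
--         number of permutations required to align the two determinants such
--         that the orders of single-particle basis functions are in maximum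
--         agreement.  This, in general, is not the minimal possible number of
--         permutations but the parity of the permutations, which is all that is
--         required for calculating matrix elements, is correct.
-- '''
--
--     # Get excitation.
--     # Also work out the number of permutations required to line up the two
--     # derminants.  We do this by counting the number of permutations
--     # required to move the spin-orbitals to the 'end' of each determinant.
--     from_1 = []
--     to_2 = []
--     nperm = 0
--     nfound = 0
--     for (indx, basis) in enumerate(d1):
--         if basis not in d2:
--             from_1.append(basis)
--             # Number of permutations required to move basis fn to the end.
--             # Have to take into account if we've already moved one orbital
--             # to the end.
--             nperm += len(d1) - indx - 1 + nfound
--             nfound += 1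
--     nfound = 0
--     # Ditto for second determinant.
--     for (indx, basis) in enumerate(d2):
--         if basis not in d1:
--             to_2.append(basis)
--             nperm += len(d2) - indx - 1 + nfound
--             nfound += 1
--
--     return (from_1, to_2, nperm)
-- ===== SOURCE B (Python) =====
-- def determinant_excitation(d1, d2):
--     s1 = set(d1)
--     s2 = set(d2)
--     from_1 = [b for b in d1 if b not in s2]
--     to_2 = [b for b in d2 if b not in s1]
--     idx1 = [i for i, b in enumerate(d1) if b not in s2]
--     idx2 = [i for i, b in enumerate(d2) if b not in s1]
--     k1, k2 = len(idx1), len(idx2)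
--     nperm = (k1 * (len(d1) - 1) - sum(idx1) + k1 * (k1 - 1) // 2
--              + k2 * (len(d2) - 1) - sum(idx2) + k2 * (k2 - 1) // 2)
--     return (from_1, to_2, nperm)
-- ===== Notes on version B (the rewrite author's own statement) =====
-- stated objective: faster
-- what changed: Replaces A's fold threading running nperm/nfound accumulators (with O(n) list membership inside the loop) by set-based membership plus comprehensions over mismatched elements/indices and a closed-form triangular-number formula for the permutation count.
import Mathlib
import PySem

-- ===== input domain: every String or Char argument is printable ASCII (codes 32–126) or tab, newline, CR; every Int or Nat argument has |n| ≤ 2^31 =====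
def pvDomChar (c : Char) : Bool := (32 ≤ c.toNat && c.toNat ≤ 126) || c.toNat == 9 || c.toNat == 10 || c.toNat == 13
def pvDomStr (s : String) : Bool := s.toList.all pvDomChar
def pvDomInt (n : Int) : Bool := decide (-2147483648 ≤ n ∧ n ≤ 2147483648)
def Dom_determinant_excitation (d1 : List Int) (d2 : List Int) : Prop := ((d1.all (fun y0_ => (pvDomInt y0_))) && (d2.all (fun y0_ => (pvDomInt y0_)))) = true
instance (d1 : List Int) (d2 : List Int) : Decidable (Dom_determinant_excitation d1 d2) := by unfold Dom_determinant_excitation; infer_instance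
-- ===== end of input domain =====

-- B replaces the running nperm/nfound accumulators by a closed-form arithmetic count over the
-- mismatched indices (objective: simpler decomposition; no asymptotic claim proved here).

-- ===== PORT A =====
-- the body of both Python for-loops (they are textually identical up to d1/d2 swap):
-- state = (collected list, nperm, nfound)
def pvLoopA (other : List Int) (n : Int) (st : List Int × Int × Int)
    (l : List (Int × Int)) : List Int × Int × Int :=
  l.foldl (fun st p =>
    if p.2 ∈ other then st
    else (st.1 ++ [p.2], st.2.1 + (n - p.1 - 1 + st.2.2), st.2.2 + 1)) st

def determinant_excitation (d1 : List Int) (d2 : List Int) : List Int × List Int × Int :=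
  let r1 := pvLoopA d2 (d1.length : Int) ([], 0, 0) (PySem.List.enumerate d1 0)
  let r2 := pvLoopA d1 (d2.length : Int) ([], r1.2.1, 0) (PySem.List.enumerate d2 0)
  (r1.1, r2.1, r2.2.1)

-- ===== PORT B =====
def determinant_excitation_alt (d1 : List Int) (d2 : List Int) : List Int × List Int × Int :=
  let s1 := PySem.Set.ofList d1
  let s2 := PySem.Set.ofList d2
  let from_1 := d1.filter (fun b => !(PySem.Set.contains s2 b))
  let to_2 := d2.filter (fun b => !(PySem.Set.contains s1 b))
  let idx1 := ((PySem.List.enumerate d1 0).filter (fun p => !(PySem.Set.contains s2 p.2))).map (·.1)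
  let idx2 := ((PySem.List.enumerate d2 0).filter (fun p => !(PySem.Set.contains s1 p.2))).map (·.1)
  let k1 : Int := idx1.length
  let k2 : Int := idx2.length
  let nperm := k1 * ((d1.length : Int) - 1) - idx1.sum + PySem.Int.floordiv (k1 * (k1 - 1)) 2
             + k2 * ((d2.length : Int) - 1) - idx2.sum + PySem.Int.floordiv (k2 * (k2 - 1)) 2
  (from_1, to_2, nperm)

-- ===== PRECONDITION & SPEC =====
def Spec_determinant_excitation (d1 : List Int) (d2 : List Int) (out : List Int × List Int × Int) : Prop := out = determinant_excitation_alt d1 d2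
instance (d1 : List Int) (d2 : List Int) (out : List Int × List Int × Int) : Decidable (Spec_determinant_excitation d1 d2 out) := by unfold Spec_determinant_excitation; infer_instance

-- ===== CLAIM (what is proved, stated in full; the proofs are below) =====
def Claim_equal_determinant_excitation : Prop := ∀ (d1 : List Int) (d2 : List Int), Dom_determinant_excitation d1 d2 → Spec_determinant_excitation d1 d2 (determinant_excitation d1 d2)

-- ===== LEMMAS AND PROOFS =====

-- closed form of the loop: the filter of mismatched enumerate pairs determines everything
lemma pvLoopA_closed (other : List Int) (n : Int) (l : List (Int × Int))
    (fr : List Int) (np nf : Int) :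
    pvLoopA other n (fr, np, nf) l =
      (fr ++ (l.filter (fun p => !decide (p.2 ∈ other))).map (·.2),
       np + ((l.filter (fun p => !decide (p.2 ∈ other))).map (fun p => n - p.1 - 1)).sum
          + nf * ((l.filter (fun p => !decide (p.2 ∈ other))).length : Int)
          + (((l.filter (fun p => !decide (p.2 ∈ other))).length
              * ((l.filter (fun p => !decide (p.2 ∈ other))).length - 1) / 2 : Nat) : Int),
       nf + ((l.filter (fun p => !decide (p.2 ∈ other))).length : Int)) := by
  induction l generalizing fr np nf with
  | nil => simp [pvLoopA]
  | cons p t ih =>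
    simp only [pvLoopA] at ih ⊢
    rw [List.foldl_cons]
    by_cases h : p.2 ∈ other
    · rw [if_pos h, ih, List.filter_cons_of_neg (by simp [h])]
    · rw [if_neg h, ih, List.filter_cons_of_pos (by simp [h])]
      simp only [Prod.mk.injEq, List.length_cons, List.map_cons, List.sum_cons]
      set k := (t.filter (fun p => !decide (p.2 ∈ other))).length with hkdef
      have htri : ((k + 1) * (k + 1 - 1) / 2 : Nat) = (k * (k - 1) / 2 : Nat) + k := by
        cases k with
        | zero => rfl
        | succ m =>
          have h1 : (m + 1 + 1) * (m + 1 + 1 - 1) = (m + 1) * (m + 1 - 1) + 2 * (m + 1) := by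
            simp only [Nat.add_sub_cancel]; ring
          rw [h1, Nat.add_mul_div_left _ _ (by norm_num)]
      rw [htri]
      refine ⟨by simp, by push_cast; ring, by push_cast; ring⟩

-- mismatched elements = snd of mismatched enumerate pairs
lemma filter_enumerate_snd (q : Int × Int → Bool) (q' : Int → Bool) (h : ∀ p, q p = q' p.2)
    (xs : List Int) (s : Int) :
    ((PySem.List.enumerate xs s).filter q).map (·.2) = xs.filter q' := by
  induction xs generalizing s with
  | nil => simp [PySem.List.enumerate_nil]
  | cons x t ih =>
    rw [PySem.List.enumerate_cons]
    by_cases hx : q' x = true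
    · simp [h, hx, ih]
    · simp [h, hx, ih]

-- Σ (n - i - 1) over a list of indices, in closed form
lemma sum_map_sub (n : Int) (m : List (Int × Int)) :
    (m.map (fun p => n - p.1 - 1)).sum
      = (m.length : Int) * (n - 1) - (m.map (·.1)).sum := by
  induction m with
  | nil => simp
  | cons p t ih => simp [ih]; ring

-- k*(k-1)//2 (Python floor division) is the Nat-division triangular number when k = a length
lemma floordiv_tri (k : Nat) :
    PySem.Int.floordiv ((k : Int) * ((k : Int) - 1)) 2 = ((k * (k - 1) / 2 : Nat) : Int) := by
  cases k with
  | zero => decide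
  | succ m =>
    have h1 : ((m + 1 : Nat) : Int) * (((m + 1 : Nat) : Int) - 1) = (((m + 1) * m : Nat) : Int) := by
      push_cast; ring
    have h2 : (2 : Int) = ((2 : Nat) : Int) := rfl
    rw [h1, h2, PySem.Int.floordiv_natCast]
    simp

-- PySem.Set membership agrees with list membership
lemma contains_ofList (xs : List Int) (b : Int) :
    PySem.Set.contains (PySem.Set.ofList xs) b = decide (b ∈ xs) := by
  simp [PySem.Set.contains]

-- ===== VERDICT (by name: the statement is the Claim_ definition above) =====
theorem determinant_excitation_spec : Claim_equal_determinant_excitation := by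
  intro d1 d2 _
  show _ = _
  unfold determinant_excitation determinant_excitation_alt
  simp only [contains_ofList, pvLoopA_closed, List.nil_append, zero_add, List.length_map,
    Prod.mk.injEq]
  refine ⟨filter_enumerate_snd (fun p => !decide (p.2 ∈ d2)) (fun b => !decide (b ∈ d2))
            (fun _ => rfl) d1 0,
          filter_enumerate_snd (fun p => !decide (p.2 ∈ d1)) (fun b => !decide (b ∈ d1))
            (fun _ => rfl) d2 0, ?_⟩
  rw [floordiv_tri, floordiv_tri, sum_map_sub, sum_map_sub]
  ring
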